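-- pv_equiv track=rewrite | github.com/bkk21/Algorithm-log | 프로그래머스/0/120843. 공 던지기/공 던지기.py | solution
-- ===== SOURCE A (Python) =====
-- def solution(numbers, k):
--     answer = 0
--
--     now = 1
--     count = 0
--
--     while count != k - 1:
--         if now + 2 > len(numbers):
--             now = now + 2 - len(numbers)
--             answer = now
--             count += 1
--         else:
--             now += 2
--             answer = now
--             count += 1
--
--     return answer
-- ===== SOURCE B (Python) =====
-- def solution(numbers, k):
--     return 1 + (2 * (k - 1)) % len(numbers)
-- ===== Notes on version B (the rewrite author's own statement) =====
-- stated objective: faster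
-- what changed: Replaces the step-by-step O(k) throwing loop with the closed-form modular expression 1 + (2*(k-1)) % len(numbers).
-- intended difference: For k = 1 (no throw performed) A returns its initial sentinel 0, which is not a valid position; B returns 1, the position holding the ball after zero throws, which is the intended value. — e.g. on solution([1, 2, 3], 1): A returns 0, B returns 1
-- outside the precondition, e.g. on solution([], 2): A returns 3, B raises ZeroDivisionError; on solution([5], 3): A returns 3, B returns 1
import Mathlib
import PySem

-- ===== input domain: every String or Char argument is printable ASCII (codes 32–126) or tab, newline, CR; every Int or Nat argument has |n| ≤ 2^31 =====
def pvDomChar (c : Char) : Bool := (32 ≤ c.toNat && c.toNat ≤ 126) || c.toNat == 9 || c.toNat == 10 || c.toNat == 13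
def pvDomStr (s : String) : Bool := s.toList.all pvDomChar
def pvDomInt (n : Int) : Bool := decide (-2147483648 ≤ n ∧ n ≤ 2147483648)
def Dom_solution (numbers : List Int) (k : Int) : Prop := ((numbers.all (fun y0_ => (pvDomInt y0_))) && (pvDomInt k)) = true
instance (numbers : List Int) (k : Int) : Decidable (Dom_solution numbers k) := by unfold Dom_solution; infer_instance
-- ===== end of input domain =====

-- B replaces A's O(k) step-by-step throwing loop with the O(1) closed form 1 + (2*(k-1)) % len(numbers).


-- ===== PORT A =====
-- the while loop, run (k-1) times (k-1 executions of 'count += 1' reach count = k-1);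
-- for k ≤ 0 the Python loop never terminates (outside Pre_), here fuel (k-1).toNat = 0
def solutionLoop (len : Int) : Nat → Int → Int → Int
  | 0, _, answer => answer
  | t + 1, now, answer =>
    if now + 2 > len then
      solutionLoop len t (now + 2 - len) (now + 2 - len)
    else
      solutionLoop len t (now + 2) (now + 2)

def solution (numbers : List Int) (k : Int) : Int :=
  solutionLoop (numbers.length : Int) (k - 1).toNat 1 0

-- ===== PORT B =====
def solution_alt (numbers : List Int) (k : Int) : Int :=
  1 + PySem.Int.mod (2 * (k - 1)) (numbers.length : Int)

-- ===== PRECONDITION & SPEC =====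
-- Pre_ excludes k ≤ 0, on which A loops forever, and lists with fewer than two elements,
-- a degenerate circle on which A's returned 'positions' exceed the circle size (its single
-- subtraction of len fails to wrap) and B's modulus is zero/degenerate (B raises on []).
def Pre_solution (numbers : List Int) (k : Int) : Prop := 2 ≤ numbers.length ∧ 1 ≤ k
instance (numbers : List Int) (k : Int) : Decidable (Pre_solution numbers k) := by unfold Pre_solution; infer_instance
def pvWitness_solution : List Int × Int := ([1, 2, 3], 4)

-- For k = 1 (no throw performed) A returns its initial sentinel 0, which is not a valid
-- position; B returns 1, the position holding the ball after zero throws (the intended value).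
def D_solution (numbers : List Int) (k : Int) : Prop := k = 1
instance (numbers : List Int) (k : Int) : Decidable (D_solution numbers k) := by unfold D_solution; infer_instance
def Spec_solution (numbers : List Int) (k : Int) (out : Int) : Prop := ¬ D_solution numbers k → out = solution_alt numbers k
instance (numbers : List Int) (k : Int) (out : Int) : Decidable (Spec_solution numbers k out) := by unfold Spec_solution; infer_instance
def pvDiffWitness_solution : List Int × Int := ([1, 2, 3], 1)
def pvDiffWitnessOut_solution : Int × Int := (0, 1)

-- ===== CLAIM (what is proved, stated in full; the proofs are below) =====
def Claim_unchanged_solution : Prop := ∀ (numbers : List Int) (k : Int), Dom_solution numbers k → Pre_solution numbers k → Spec_solution numbers k (solution numbers k)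
def Claim_changed_solution : Prop := Dom_solution (pvDiffWitness_solution.1) (pvDiffWitness_solution.2) ∧ Pre_solution (pvDiffWitness_solution.1) (pvDiffWitness_solution.2) ∧ D_solution (pvDiffWitness_solution.1) (pvDiffWitness_solution.2) ∧ solution (pvDiffWitness_solution.1) (pvDiffWitness_solution.2) = pvDiffWitnessOut_solution.1 ∧ solution_alt (pvDiffWitness_solution.1) (pvDiffWitness_solution.2) = pvDiffWitnessOut_solution.2 ∧ pvDiffWitnessOut_solution.1 ≠ pvDiffWitnessOut_solution.2
def Claim_exact_solution : Prop := ∀ (numbers : List Int) (k : Int), Dom_solution numbers k → Pre_solution numbers k → D_solution numbers k → solution numbers k ≠ solution_alt numbers k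

-- ===== LEMMAS AND PROOFS =====
theorem solutionLoop_zero (n now answer : Int) : solutionLoop n 0 now answer = answer := rfl

theorem solutionLoop_succ (n now answer : Int) (t : Nat) :
    solutionLoop n (t + 1) now answer =
      if now + 2 > n then solutionLoop n t (now + 2 - n) (now + 2 - n)
      else solutionLoop n t (now + 2) (now + 2) := rfl

-- Loop invariant: on a circle of size n >= 2, starting from a legal position 1 <= now <= n,
-- running t >= 1 iterations ends at position 1 + (now - 1 + 2t) % n.
theorem solutionLoop_closed (n : Int) (hn : 2 ≤ n) :
    ∀ (t : Nat) (now answer : Int), 1 ≤ t → 1 ≤ now → now ≤ n →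
      solutionLoop n t now answer = 1 + (now - 1 + 2 * (t : Int)) % n := by
  intro t
  induction t with
  | zero => intro now answer ht; omega
  | succ t ih =>
    intro now answer _ h1 h2
    rw [solutionLoop_succ]
    rcases Nat.eq_zero_or_pos t with rfl | htpos
    · split_ifs with h
      · rw [solutionLoop_zero]
        push_cast
        have : now - 1 + 2 = (now + 1 - n) + n := by ring
        rw [this, Int.add_emod_right, Int.emod_eq_of_lt (by omega) (by omega)]
        omega
      · rw [solutionLoop_zero]
        push_cast
        rw [Int.emod_eq_of_lt (by omega) (by omega)]
        omega
    · split_ifs with h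
      · rw [ih (now + 2 - n) (now + 2 - n) htpos (by omega) (by omega)]
        have : now + 2 - n - 1 + 2 * (t : Int) = (now - 1 + 2 * ((t : Int) + 1)) - n := by ring
        rw [this, Int.sub_emod_right]
        push_cast
        ring_nf
      · rw [ih (now + 2) (now + 2) htpos (by omega) (by omega)]
        congr 1
        push_cast
        ring

theorem mod_eq_emod_pos (a b : Int) (hb : 0 < b) : PySem.Int.mod a b = a % b :=
  PySem.Int.mod_eq_emod_of_pos hb

-- ===== VERDICT (by name: the statement is the Claim_ definition above) =====
theorem solution_spec : Claim_unchanged_solution := by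
  intro numbers k _ hpre hd
  obtain ⟨hn, hk⟩ := hpre
  have hk2 : 2 ≤ k := by
    rcases lt_or_eq_of_le hk with h | h
    · omega
    · exact absurd h.symm hd
  have hn2 : (2 : Int) ≤ (numbers.length : Int) := by exact_mod_cast hn
  have ht : 1 ≤ (k - 1).toNat := by omega
  unfold solution solution_alt
  rw [solutionLoop_closed (numbers.length : Int) hn2 (k - 1).toNat 1 0 ht (by omega) (by omega),
      mod_eq_emod_pos _ _ (by omega)]
  have hcast : (((k - 1).toNat : Int)) = k - 1 := by omega
  rw [hcast]
  ring_nf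

theorem solution_changed : Claim_changed_solution := by
  unfold Claim_changed_solution; decide

theorem solution_tight : Claim_exact_solution := by
  intro numbers k _ hpre hd
  obtain ⟨hn, _⟩ := hpre
  have hn2 : (2 : Int) ≤ (numbers.length : Int) := by exact_mod_cast hn
  subst hd
  unfold solution solution_alt
  norm_num [solutionLoop_zero, mod_eq_emod_pos _ _ (by omega : (0:Int) < (numbers.length : Int))]
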